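-- pv_equiv track=rewrite | github.com/widuruwana/ivory | make_bottles.py | generate_string
-- ===== SOURCE A (Python) =====
-- def get_instruction_path(start_val, target_val):
--     moves = []
--     diff = target_val - start_val
--     tens = abs(diff) // 10
--     ones = abs(diff) % 10
--
--     if diff > 0:
--         moves.extend(["passion"] * tens)
--         moves.extend(["adore"] * ones)
--     elif diff < 0:
--         moves.extend(["heartbreak"] * tens)
--         moves.extend(["miss"] * ones)
--     return moves
--
-- def generate_string(text):
--     code_words = ["forget"] # Clear the workspace cell
--     current_val = 0
--     for char in text:
--         target_val = ord(char)
--         path_a = get_instruction_path(current_val, target_val)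
--         path_b = ["forget"] + get_instruction_path(0, target_val)
--
--         if len(path_b) < len(path_a):
--             code_words.extend(path_b)
--         else:
--             code_words.extend(path_a)
--
--         code_words.append("whisper")
--         current_val = target_val
--     return code_words
-- ===== SOURCE B (Python) =====
-- def _walk(cur, target):
--     # emit one move-word per step, recursively, until cur reaches target
--     d = target - cur
--     if d == 0:
--         return []
--     if d >= 10:
--         return ["passion"] + _walk(cur + 10, target)
--     if d > 0:
--         return ["adore"] + _walk(cur + 1, target)
--     if d <= -10:
--         return ["heartbreak"] + _walk(cur - 10, target)
--     return ["miss"] + _walk(cur - 1, target)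
--
-- def _emit(cur, target):
--     d = abs(target - cur)
--     if 1 + target // 10 + target % 10 < d // 10 + d % 10:
--         return ["forget"] + _walk(0, target)
--     return _walk(cur, target)
--
-- def generate_string(text):
--     codes = [ord(c) for c in text]
--     return ["forget"] + [w for prev, t in zip([0] + codes, codes)
--                          for w in _emit(prev, t) + ["whisper"]]
-- ===== Notes on version B (the rewrite author's own statement) =====
-- stated objective: alternative
-- what changed: B replaces A's stateful loop that builds both candidate move lists with replicate-multiplication and compares their lengths by a staged pipeline: zip consecutive character codes and flat-map a recursive one-step walker that emits one move-word per recursive call, choosing the reset path by a single arithmetic cost test.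
import Mathlib
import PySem

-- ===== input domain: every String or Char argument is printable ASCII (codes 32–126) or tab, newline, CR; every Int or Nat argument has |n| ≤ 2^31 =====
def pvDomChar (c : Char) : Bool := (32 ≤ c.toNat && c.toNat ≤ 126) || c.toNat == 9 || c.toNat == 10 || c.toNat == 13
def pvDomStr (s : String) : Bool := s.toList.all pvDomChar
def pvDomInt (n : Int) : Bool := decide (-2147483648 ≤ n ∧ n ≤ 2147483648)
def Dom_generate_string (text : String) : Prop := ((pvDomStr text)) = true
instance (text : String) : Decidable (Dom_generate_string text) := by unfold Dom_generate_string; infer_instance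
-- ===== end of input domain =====

-- B replaces A's build-both-candidate-lists-and-compare loop by a zip/flat-map pipeline over a
-- recursive one-step walker with an arithmetic reset test (alternative decomposition; same cost).


-- ===== PORT A =====
-- abs(diff)//10 and abs(diff)%10 are ported as Nat division on diff.natAbs: exact, since abs(diff) ≥ 0.
def get_instruction_path (start_val target_val : Int) : List String :=
  let diff := target_val - start_val
  let tens := diff.natAbs / 10
  let ones := diff.natAbs % 10
  if diff > 0 then List.replicate tens "passion" ++ List.replicate ones "adore"
  else if diff < 0 then List.replicate tens "heartbreak" ++ List.replicate ones "miss"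
  else []

def pvStepA (st : List String × Int) (ch : Char) : List String × Int :=
  let target_val : Int := (ch.toNat : Int)
  let path_a := get_instruction_path st.2 target_val
  let path_b := "forget" :: get_instruction_path 0 target_val
  let code_words := st.1 ++ (if path_b.length < path_a.length then path_b else path_a)
  (code_words ++ ["whisper"], target_val)

def generate_string (text : String) : List String :=
  (text.toList.foldl pvStepA (["forget"], 0)).1

-- ===== PORT B =====
-- one move-word per recursive call; the fuel |target - cur| is a totality guard only (it bounds
-- the number of emitted words, so it is never exhausted on the recursion Source B performs)
def pvWalkF : Nat → Int → Int → List String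
  | 0, _, _ => []
  | fuel + 1, cur, target =>
    let d := target - cur
    if d = 0 then []
    else if d ≥ 10 then "passion" :: pvWalkF fuel (cur + 10) target
    else if d > 0 then "adore" :: pvWalkF fuel (cur + 1) target
    else if d ≤ -10 then "heartbreak" :: pvWalkF fuel (cur - 10) target
    else "miss" :: pvWalkF fuel (cur - 1) target

def pvWalk (cur target : Int) : List String := pvWalkF (target - cur).natAbs cur target

-- abs(target-cur) ≥ 0 so its //10, %10 are Nat division on natAbs; target//10, target%10 use Python floor semantics
def pvEmit (cur target : Int) : List String :=
  let d := (target - cur).natAbs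
  if 1 + PySem.Int.floordiv target 10 + PySem.Int.mod target 10 < (d / 10 : Int) + (d % 10 : Int) then
    "forget" :: pvWalk 0 target
  else pvWalk cur target

def generate_string_alt (text : String) : List String :=
  let codes := text.toList.map (fun c => (c.toNat : Int))
  "forget" :: ((0 :: codes).zip codes).flatMap (fun p => pvEmit p.1 p.2 ++ ["whisper"])

-- ===== PRECONDITION & SPEC =====
def Spec_generate_string (text : String) (out : List String) : Prop := out = generate_string_alt text
instance (text : String) (out : List String) : Decidable (Spec_generate_string text out) := by unfold Spec_generate_string; infer_instance

-- ===== CLAIM (what is proved, stated in full; the proofs are below) =====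
def Claim_equal_generate_string : Prop := ∀ (text : String), Dom_generate_string text → Spec_generate_string text (generate_string text)

-- ===== LEMMAS AND PROOFS =====
theorem gip_len (s t : Int) :
    (get_instruction_path s t).length = (t - s).natAbs / 10 + (t - s).natAbs % 10 := by
  unfold get_instruction_path
  dsimp only
  split_ifs with h1 h2
  · simp
  · simp
  · simp; omega

theorem walk_eq_gip_aux : ∀ (n : Nat) (cur target : Int), (target - cur).natAbs ≤ n →
    pvWalkF n cur target = get_instruction_path cur target := by
  intro n
  induction n with
  | zero =>
      intro cur target h
      rw [pvWalkF]; unfold get_instruction_path; dsimp only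
      rw [if_neg (by omega : ¬ target - cur > 0), if_neg (by omega : ¬ target - cur < 0)]
  | succ n ih =>
      intro cur target h
      rw [pvWalkF]
      by_cases h0 : target - cur = 0
      · rw [if_pos h0]; unfold get_instruction_path; dsimp only
        rw [if_neg (by omega), if_neg (by omega)]
      · rw [if_neg h0]
        by_cases hge : target - cur ≥ 10
        · rw [if_pos hge, ih (cur + 10) target (by omega)]
          unfold get_instruction_path; dsimp only
          rw [if_pos (by omega : target - cur > 0)]
          by_cases hq : target - (cur + 10) > 0
          · rw [if_pos hq,
                show (target - cur).natAbs / 10 = (target - (cur + 10)).natAbs / 10 + 1 by omega,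
                show (target - cur).natAbs % 10 = (target - (cur + 10)).natAbs % 10 by omega]
            rfl
          · rw [if_neg hq, if_neg (by omega : ¬ target - (cur + 10) < 0),
                show (target - cur).natAbs / 10 = 1 by omega,
                show (target - cur).natAbs % 10 = 0 by omega]
            simp
        · rw [if_neg hge]
          by_cases hpos : target - cur > 0
          · rw [if_pos hpos, ih (cur + 1) target (by omega)]
            unfold get_instruction_path; dsimp only
            rw [if_pos hpos]
            by_cases hp1 : target - (cur + 1) > 0
            · rw [if_pos hp1,
                  show (target - cur).natAbs / 10 = 0 by omega,
                  show (target - (cur + 1)).natAbs / 10 = 0 by omega,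
                  show (target - cur).natAbs % 10 = (target - (cur + 1)).natAbs % 10 + 1 by omega]
              simp [List.replicate_succ]
            · rw [if_neg hp1, if_neg (by omega : ¬ target - (cur + 1) < 0),
                  show (target - cur).natAbs / 10 = 0 by omega,
                  show (target - cur).natAbs % 10 = 1 by omega]
              rfl
          · rw [if_neg hpos]
            by_cases hle : target - cur ≤ -10
            · rw [if_pos hle, ih (cur - 10) target (by omega)]
              unfold get_instruction_path; dsimp only
              rw [if_neg (by omega : ¬ target - cur > 0), if_pos (by omega : target - cur < 0)]
              by_cases hq : target - (cur - 10) < 0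
              · rw [if_neg (by omega : ¬ target - (cur - 10) > 0), if_pos hq,
                    show (target - cur).natAbs / 10 = (target - (cur - 10)).natAbs / 10 + 1 by omega,
                    show (target - cur).natAbs % 10 = (target - (cur - 10)).natAbs % 10 by omega]
                rfl
              · rw [if_neg (by omega : ¬ target - (cur - 10) > 0), if_neg hq,
                    show (target - cur).natAbs / 10 = 1 by omega,
                    show (target - cur).natAbs % 10 = 0 by omega]
                simp
            · rw [if_neg hle, ih (cur - 1) target (by omega)]
              unfold get_instruction_path; dsimp only
              rw [if_neg (by omega : ¬ target - cur > 0), if_pos (by omega : target - cur < 0)]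
              by_cases hm1 : target - (cur - 1) < 0
              · rw [if_neg (by omega : ¬ target - (cur - 1) > 0), if_pos hm1,
                    show (target - cur).natAbs / 10 = 0 by omega,
                    show (target - (cur - 1)).natAbs / 10 = 0 by omega,
                    show (target - cur).natAbs % 10 = (target - (cur - 1)).natAbs % 10 + 1 by omega]
                simp [List.replicate_succ]
              · rw [if_neg (by omega : ¬ target - (cur - 1) > 0), if_neg hm1,
                    show (target - cur).natAbs / 10 = 0 by omega,
                    show (target - cur).natAbs % 10 = 1 by omega]
                rfl

theorem walk_eq_gip (cur target : Int) :
    pvWalk cur target = get_instruction_path cur target :=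
  walk_eq_gip_aux (target - cur).natAbs cur target le_rfl

theorem emit_eq (cur target : Int) (ht : 0 ≤ target) :
    pvEmit cur target =
      (if ("forget" :: get_instruction_path 0 target).length < (get_instruction_path cur target).length
       then "forget" :: get_instruction_path 0 target
       else get_instruction_path cur target) := by
  unfold pvEmit
  dsimp only
  rw [walk_eq_gip, walk_eq_gip]
  have hfd : PySem.Int.floordiv target 10 = target / 10 := PySem.Int.floordiv_eq_ediv_of_pos (by omega)
  have hmd : PySem.Int.mod target 10 = target % 10 := PySem.Int.mod_eq_emod_of_pos (by omega)
  have hcond : (1 + PySem.Int.floordiv target 10 + PySem.Int.mod target 10 <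
      ((target - cur).natAbs : Int) / 10 + ((target - cur).natAbs : Int) % 10) ↔
      (("forget" :: get_instruction_path 0 target).length < (get_instruction_path cur target).length) := by
    rw [hfd, hmd, List.length_cons, gip_len, gip_len]
    omega
  by_cases h : ("forget" :: get_instruction_path 0 target).length < (get_instruction_path cur target).length
  · rw [if_pos (hcond.mpr h), if_pos h]
  · rw [if_neg (fun hx => h (hcond.mp hx)), if_neg h]

-- proof helper: the per-character chunks of the output, consumed left to right
def pvChunks : Int → List Int → List String
  | _, [] => []
  | cur, t :: ts => pvEmit cur t ++ ["whisper"] ++ pvChunks t ts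

theorem zip_flatMap_chunks (cur : Int) (codes : List Int) :
    ((cur :: codes).zip codes).flatMap (fun p => pvEmit p.1 p.2 ++ ["whisper"]) =
      pvChunks cur codes := by
  induction codes generalizing cur with
  | nil => rfl
  | cons t ts ih => simp [pvChunks, ← ih t]

theorem foldA_chunks (cs : List Char) (acc : List String) (cur : Int) :
    (cs.foldl pvStepA (acc, cur)).1 = acc ++ pvChunks cur (cs.map (fun c => (c.toNat : Int))) := by
  induction cs generalizing acc cur with
  | nil => simp [pvChunks]
  | cons c cs ih =>
      rw [List.foldl_cons]
      show (cs.foldl pvStepA (pvStepA (acc, cur) c)).1 = _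
      rw [show pvStepA (acc, cur) c =
          ((acc ++ (if ("forget" :: get_instruction_path 0 (c.toNat : Int)).length <
                (get_instruction_path cur (c.toNat : Int)).length
              then "forget" :: get_instruction_path 0 (c.toNat : Int)
              else get_instruction_path cur (c.toNat : Int))) ++ ["whisper"], (c.toNat : Int)) from rfl]
      rw [ih]
      rw [← emit_eq cur (c.toNat : Int) (by positivity)]
      simp [pvChunks]

-- ===== VERDICT (by name: the statement is the Claim_ definition above) =====
theorem generate_string_spec : Claim_equal_generate_string := by
  intro text _
  show (generate_string text) = generate_string_alt text
  unfold generate_string generate_string_alt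
  rw [foldA_chunks]
  dsimp only
  rw [zip_flatMap_chunks]
  rfl
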